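-- pv_equiv track=rewrite | github.com/maephae/Motin | caley_v2.py | generate_symmetric_table
-- ===== SOURCE A (Python) =====
-- import itertools
--
-- def generate_symmetric_table(n):
--     perms = list(itertools.permutations(range(n)))
--     p_to_idx = {p: i for i, p in enumerate(perms)}
--     order = len(perms)
--     table = [[0] * order for _ in range(order)]
--     for i in range(order):
--         for j in range(order):
--             composed = tuple(perms[i][perms[j][k]] for k in range(n))
--             table[i][j] = p_to_idx[composed]
--     return table, [str(p) for p in perms]
-- ===== SOURCE B (Python) =====
-- import itertools
--
-- def generate_symmetric_table(n):
--     perms = list(itertools.permutations(range(n)))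
--
--     def rank(p):
--         # lexicographic rank via the factorial number system (Lehmer code),
--         # accumulated in mixed radix: no index dictionary needed.
--         r = 0
--         for k in range(n):
--             c = 0
--             for j in range(k + 1, n):
--                 if p[j] < p[k]:
--                     c += 1
--             r = r * (n - k) + c
--         return r
--
--     table = [[rank(tuple(pi[pj[k]] for k in range(n))) for pj in perms]
--              for pi in perms]
--     return table, [str(p) for p in perms]
-- ===== Notes on version B (the rewrite author's own statement) =====
-- stated objective: alternative
-- what changed: Drops the precomputed permutation-to-index dictionary; each table entry is instead the lexicographic rank of the composed permutation, computed on the fly via the Lehmer code / factorial number system.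
import Mathlib
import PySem

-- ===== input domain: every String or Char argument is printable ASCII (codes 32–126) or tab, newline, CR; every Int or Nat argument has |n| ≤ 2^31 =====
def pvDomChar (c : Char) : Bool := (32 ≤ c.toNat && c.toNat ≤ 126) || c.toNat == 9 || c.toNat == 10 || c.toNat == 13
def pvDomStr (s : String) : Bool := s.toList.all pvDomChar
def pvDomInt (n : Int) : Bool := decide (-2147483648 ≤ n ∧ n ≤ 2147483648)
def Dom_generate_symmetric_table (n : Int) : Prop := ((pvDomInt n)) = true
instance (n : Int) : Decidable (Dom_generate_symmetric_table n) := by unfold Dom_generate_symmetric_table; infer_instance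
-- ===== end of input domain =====

-- B replaces A's permutation→index dictionary by computing each table entry as the
-- Lehmer-code (factorial number system) lexicographic rank of the composed permutation.


-- shared helpers (both Pythons call itertools.permutations(range(n)) and [str(p) for p in perms])

-- itertools.permutations(pool) in yield order; exact for pools of distinct elements (here range(n))
def lexPermsAux : Nat → List Int → List (List Int)
  | 0, _ => [[]]
  | k+1, l => l.flatMap (fun x => (lexPermsAux k (l.erase x)).map (fun q => x :: q))

def lexPerms (l : List Int) : List (List Int) := lexPermsAux l.length l

-- str(p) for a tuple of ints: "()", "(x,)", "(a, b, ...)"; exact (Python tuple repr of ints)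
def tupleStr (p : List Int) : String :=
  match p with
  | [] => "()"
  | [x] => "(" ++ PySem.Int.toStr x ++ ",)"
  | _ => "(" ++ PySem.Str.join ", " (p.map PySem.Int.toStr) ++ ")"

-- ===== PORT A =====
def generate_symmetric_table (n : Int) : List (List Int) × List String :=
  let perms := lexPerms (PySem.List.pyRange 0 n 1)
  let p_to_idx : PySem.Dict (List Int) Int :=
    (PySem.List.enumerate perms 0).foldl (fun d ip => d.insert ip.2 ip.1) PySem.Dict.empty
  let order : Int := (perms.length : Int)
  let table := (PySem.List.pyRange 0 order 1).map (fun i =>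
    (PySem.List.pyRange 0 order 1).map (fun j =>
      let composed := (PySem.List.pyRange 0 n 1).map (fun k =>
        PySem.List.pyGetD (PySem.List.pyGetD perms i [])
          (PySem.List.pyGetD (PySem.List.pyGetD perms j []) k 0) 0)
      -- p_to_idx[composed]: the KeyError branch is unreachable (composed ∈ perms, proved below)
      p_to_idx.getD composed 0))
  (table, perms.map tupleStr)

-- ===== PORT B =====
def rankAlt (n : Int) (p : List Int) : Int :=
  (PySem.List.pyRange 0 n 1).foldl (fun r k =>
    r * (n - k) +
      (PySem.List.pyRange (k+1) n 1).foldl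
        (fun c j => if PySem.List.pyGetD p j 0 < PySem.List.pyGetD p k 0 then c + 1 else c) 0) 0

def generate_symmetric_table_alt (n : Int) : List (List Int) × List String :=
  let perms := lexPerms (PySem.List.pyRange 0 n 1)
  let table := perms.map (fun pi => perms.map (fun pj =>
    rankAlt n ((PySem.List.pyRange 0 n 1).map (fun k =>
      PySem.List.pyGetD pi (PySem.List.pyGetD pj k 0) 0))))
  (table, perms.map tupleStr)

-- ===== PRECONDITION & SPEC =====
def Spec_generate_symmetric_table (n : Int) (out : List (List Int) × List String) : Prop := out = generate_symmetric_table_alt n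
instance (n : Int) (out : List (List Int) × List String) : Decidable (Spec_generate_symmetric_table n out) := by unfold Spec_generate_symmetric_table; infer_instance

-- ===== CLAIM (what is proved, stated in full; the proofs are below) =====
def Claim_equal_generate_symmetric_table : Prop := ∀ (n : Int), Dom_generate_symmetric_table n → Spec_generate_symmetric_table n (generate_symmetric_table n)

-- ===== LEMMAS AND PROOFS =====

-- lexicographic rank (Lehmer code), factorial weights
def rkN : List Int → Nat
  | [] => 0
  | x :: p => p.countP (fun y => decide (y < x)) * p.length.factorial + rkN p

theorem lexPermsAux_length (k : Nat) : ∀ (l : List Int), l.length = k →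
    (lexPermsAux k l).length = k.factorial := by
  induction k with
  | zero => intro l _; rfl
  | succ k ih =>
    intro l hl
    simp only [lexPermsAux, List.length_flatMap]
    have : ∀ x ∈ l, ((lexPermsAux k (l.erase x)).map (fun q => x :: q)).length = k.factorial := by
      intro x hx
      rw [List.length_map, ih _ (by rw [List.length_erase_of_mem hx, hl]; rfl)]
    rw [List.map_congr_left this]
    simp [List.map_const', hl, Nat.factorial_succ, Nat.mul_comm]

theorem mem_lexPermsAux (k : Nat) : ∀ (l q : List Int), l.length = k → q.Perm l →
    q ∈ lexPermsAux k l := by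
  induction k with
  | zero =>
    intro l q hl hq
    have : l = [] := List.length_eq_zero_iff.mp hl
    subst this
    simp [List.perm_nil.mp hq, lexPermsAux]
  | succ k ih =>
    intro l q hl hq
    match q with
    | [] => exact absurd (hq.length_eq.trans hl) (by simp)
    | x :: p =>
      rcases List.cons_perm_iff_perm_erase.mp hq with ⟨hx, hp⟩
      simp only [lexPermsAux, List.mem_flatMap]
      exact ⟨x, hx, List.mem_map_of_mem
        (ih _ _ (by rw [List.length_erase_of_mem hx, hl]; rfl) hp)⟩

theorem perm_of_mem_lexPermsAux (k : Nat) : ∀ (l q : List Int), l.length = k →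
    q ∈ lexPermsAux k l → q.Perm l := by
  induction k with
  | zero =>
    intro l q hl hq
    have : l = [] := List.length_eq_zero_iff.mp hl
    subst this
    simp only [lexPermsAux, List.mem_singleton] at hq
    simp [hq]
  | succ k ih =>
    intro l q hl hq
    simp only [lexPermsAux, List.mem_flatMap, List.mem_map] at hq
    rcases hq with ⟨x, hx, p, hp, rfl⟩
    exact List.cons_perm_iff_perm_erase.mpr
      ⟨hx, ih _ _ (by rw [List.length_erase_of_mem hx, hl]; rfl) hp⟩

theorem nodup_lexPermsAux (k : Nat) : ∀ (l : List Int), l.length = k → l.Nodup →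
    (lexPermsAux k l).Nodup := by
  induction k with
  | zero => intro l _ _; simp [lexPermsAux]
  | succ k ih =>
    intro l hl hnd
    simp only [lexPermsAux]
    rw [List.nodup_flatMap]
    constructor
    · intro x hx
      exact ((ih _ (by rw [List.length_erase_of_mem hx, hl]; rfl)
        (hnd.erase x)).map (fun a b h => by injection h))
    · refine hnd.imp ?_
      intro a b hab s hs hs'
      simp only [List.mem_map] at hs hs'
      rcases hs with ⟨p, _, rfl⟩
      rcases hs' with ⟨p', _, h⟩
      exact hab ((List.cons_eq_cons.mp h).1.symm)

theorem idxOf_map_cons (x : Int) (M : List (List Int)) (p : List Int) :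
    (M.map (fun q => x :: q)).idxOf (x :: p) = M.idxOf p := by
  induction M with
  | nil => rfl
  | cons m M ih =>
    by_cases h : m = p
    · subst h; simp
    · simp only [List.map_cons, List.idxOf_cons, ih]
      have h1 : ((x :: m) == (x :: p)) = false := by
        simp [h]
      have h2 : (m == p) = false := by simp [h]
      rw [h1, h2]

theorem not_mem_flatMap_lt (x : Int) (p : List Int) (l₁ : List Int)
    (f : Int → List (List Int)) (hf : ∀ y, ∀ q ∈ f y, ∃ t, q = y :: t)
    (hlt : ∀ a ∈ l₁, a < x) : (x :: p) ∉ l₁.flatMap f := by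
  intro h
  rcases List.mem_flatMap.mp h with ⟨y, hy, hq⟩
  rcases hf y _ hq with ⟨t, ht⟩
  have : y = x := (List.cons_eq_cons.mp ht).1.symm
  exact absurd (hlt y hy) (by simp [this])

theorem idxOf_lexPermsAux (k : Nat) : ∀ (l q : List Int), l.length = k →
    l.Pairwise (· < ·) → q.Perm l → (lexPermsAux k l).idxOf q = rkN q := by
  induction k with
  | zero =>
    intro l q hl _ hq
    have : l = [] := List.length_eq_zero_iff.mp hl
    subst this
    simp [List.perm_nil.mp hq, lexPermsAux, rkN]
  | succ k ih =>
    intro l q hl hsort hq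
    match q with
    | [] => exact absurd (hq.length_eq.trans hl) (by simp)
    | x :: p =>
      rcases List.cons_perm_iff_perm_erase.mp hq with ⟨hx, hp⟩
      rcases List.append_of_mem hx with ⟨l₁, l₂, rfl⟩
      have hpair := List.pairwise_append.mp hsort
      have hlt1 : ∀ a ∈ l₁, a < x := fun a ha => hpair.2.2 a ha x (by simp)
      have hgt2 : ∀ b ∈ l₂, x < b := fun b hb =>
        (List.pairwise_cons.mp hpair.2.1).1 b hb
      have herase : (l₁ ++ x :: l₂).erase x = l₁ ++ l₂ := by
        rw [List.erase_append_right _ (fun hmem => absurd (hlt1 x hmem) (lt_irrefl x)),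
          List.erase_cons_head]
      have hel : (l₁ ++ l₂).length = k := by
        have := hl; simp at this ⊢; omega
      have hsort' : (l₁ ++ l₂).Pairwise (· < ·) := by
        refine List.pairwise_append.mpr ⟨hpair.1, (List.pairwise_cons.mp hpair.2.1).2, ?_⟩
        intro a ha b hb
        exact lt_trans (hlt1 a ha) (hgt2 b hb)
      rw [herase] at hp
      -- unfold the flatMap over l₁ ++ x :: l₂
      simp only [lexPermsAux, List.flatMap_append, List.flatMap_cons]
      have hblock : ∀ y, ∀ q' ∈ (lexPermsAux k ((l₁ ++ x :: l₂).erase y)).map (fun q => y :: q),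
          ∃ t, q' = y :: t := by
        intro y q' hq'
        rcases List.mem_map.mp hq' with ⟨t, _, rfl⟩
        exact ⟨t, rfl⟩
      have hnotmem : (x :: p) ∉ l₁.flatMap (fun y => (lexPermsAux k ((l₁ ++ x :: l₂).erase y)).map (fun q => y :: q)) :=
        not_mem_flatMap_lt x p l₁ _ (fun y => hblock y) hlt1
      rw [List.idxOf_append, if_neg hnotmem]
      have hmem2 : (x :: p) ∈ (lexPermsAux k ((l₁ ++ x :: l₂).erase x)).map (fun q => x :: q) := by
        rw [herase]
        exact List.mem_map_of_mem (mem_lexPermsAux k _ _ hel hp)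
      rw [List.idxOf_append, if_pos hmem2, herase, idxOf_map_cons,
        ih _ _ hel hsort' hp]
      -- length of the l₁ part
      have hlen1 : (l₁.flatMap (fun y => (lexPermsAux k ((l₁ ++ x :: l₂).erase y)).map (fun q => y :: q))).length
          = l₁.length * k.factorial := by
        rw [List.length_flatMap]
        have : ∀ y ∈ l₁, ((lexPermsAux k ((l₁ ++ x :: l₂).erase y)).map (fun q => y :: q)).length = k.factorial := by
          intro y hy
          rw [List.length_map, lexPermsAux_length k]
          rw [List.length_erase_of_mem (by simp [hy]), hl]; rfl
        rw [List.map_congr_left this]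
        simp [List.map_const']
      rw [hlen1]
      -- rkN (x :: p)
      have hcount : p.countP (fun y => decide (y < x)) = l₁.length := by
        have h1 : (l₁ ++ x :: l₂).countP (fun y => decide (y < x)) = l₁.length := by
          rw [List.countP_append, List.countP_cons]
          have e1 : l₁.countP (fun y => decide (y < x)) = l₁.length :=
            List.countP_eq_length.mpr (fun a ha => by simpa using hlt1 a ha)
          have e2 : l₂.countP (fun y => decide (y < x)) = 0 :=
            List.countP_eq_zero.mpr (fun b hb => by simpa using not_lt_of_gt (hgt2 b hb))
          simp [e1, e2]
        have h2 : (x :: p).countP (fun y => decide (y < x)) = l₁.length := by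
          rw [hq.countP_eq]; exact h1
        simpa [List.countP_cons] using h2
      have hplen : p.length = k := by rw [hp.length_eq, hel]
      simp only [rkN, hcount, hplen]
      omega

-- the rank loop of B computes rkN
theorem rankAlt_loop (q : List Int) : ∀ (m : Nat) (a r : Int), 0 ≤ a → (m : Int) = (q.length : Int) - a →
    (PySem.List.pyRange a (q.length : Int) 1).foldl (fun r k =>
      r * ((q.length : Int) - k) +
        (PySem.List.pyRange (k+1) (q.length : Int) 1).foldl
          (fun c j => if PySem.List.pyGetD q j 0 < PySem.List.pyGetD q k 0 then c + 1 else c) 0) r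
      = r * ((q.drop a.toNat).length.factorial : Int) + (rkN (q.drop a.toNat) : Int) := by
  intro m
  induction m with
  | zero =>
    intro a r ha hm
    have hge : (q.length : Int) ≤ a := by omega
    rw [PySem.List.pyRange_one_eq_nil hge]
    have hdrop : q.drop a.toNat = [] := by
      apply List.drop_eq_nil_of_le; omega
    simp [hdrop, rkN]
  | succ m ih =>
    intro a r ha hm
    have hlt : a < (q.length : Int) := by omega
    have hat : a.toNat < q.length := by omega
    rw [PySem.List.pyRange_one_cons hlt, List.foldl_cons]
    rw [ih (a+1) _ (by omega) (by omega)]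
    have hdrop : q.drop a.toNat = q[a.toNat] :: q.drop (a.toNat + 1) :=
      List.drop_eq_getElem_cons hat
    have hat1 : (a+1).toNat = a.toNat + 1 := by omega
    -- inner loop = countP on the suffix
    have hinner : (PySem.List.pyRange (a+1) (q.length : Int) 1).foldl
        (fun c j => if PySem.List.pyGetD q j 0 < PySem.List.pyGetD q a 0 then c + 1 else c) 0
        = ((q.drop (a.toNat + 1)).countP (fun y => decide (y < q[a.toNat])) : Int) := by
      rw [PySem.List.foldl_pyRange_pyGetD' q 0
        (fun c u => if u < PySem.List.pyGetD q a 0 then c + 1 else c) 0 (by omega : (0:Int) ≤ a + 1)]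
      rw [hat1, PySem.List.pyGetD_eq_getElem q 0 ha (by omega)]
      have := PySem.List.foldl_count_if (fun y => decide (y < q[a.toNat])) (q.drop (a.toNat+1)) 0
      simpa using this
    rw [hinner]
    have hlen : (q.length : Int) - a = ((q.drop (a.toNat + 1)).length : Int) + 1 := by
      simp [List.length_drop]; omega
    rw [hat1, hdrop, hlen]
    simp only [rkN, List.length_cons, Nat.factorial_succ]
    push_cast
    ring

theorem rankAlt_eq_rkN (n : Int) (q : List Int) (hq : q.length = n.toNat) :
    rankAlt n q = (rkN q : Int) := by
  unfold rankAlt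
  by_cases hn : 0 ≤ n
  · have hlen : (q.length : Int) = n := by omega
    rw [← hlen]
    have := rankAlt_loop q q.length 0 0 le_rfl (by omega)
    simpa using this
  · rw [PySem.List.pyRange_one_eq_nil (by omega)]
    have hnil : q = [] := List.eq_nil_of_length_eq_zero (by omega)
    simp [hnil, rkN]

theorem dict_getD (perms : List (List Int)) (hnd : perms.Nodup) (q : List Int) (hq : q ∈ perms) :
    ((PySem.List.enumerate perms 0).foldl (fun d ip => d.insert ip.2 ip.1)
      (PySem.Dict.empty : PySem.Dict (List Int) Int)).getD q 0 = (perms.idxOf q : Int) := by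
  have hsnd : (PySem.List.enumerate perms 0).map (fun x => x.2) = perms :=
    PySem.List.map_snd_enumerate perms 0
  have hitems : ((PySem.List.enumerate perms 0).foldl (fun d ip => d.insert ip.2 ip.1)
      (PySem.Dict.empty : PySem.Dict (List Int) Int)).items
      = (PySem.List.enumerate perms 0).map (fun ip => (ip.2, ip.1)) := by
    have := PySem.Dict.items_foldl_insert_fresh (PySem.List.enumerate perms 0)
      (fun x => x.2) (fun x => x.1) (PySem.Dict.empty : PySem.Dict (List Int) Int)
      (fun a _ => by simp) (by rw [hsnd]; exact hnd)
    simpa using this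
  have hkeys : ((PySem.List.enumerate perms 0).foldl (fun d ip => d.insert ip.2 ip.1)
      (PySem.Dict.empty : PySem.Dict (List Int) Int)).keys = perms := by
    simp only [PySem.Dict.keys, hitems, List.map_map]
    exact hsnd
  have hk : perms.idxOf q < perms.length := List.idxOf_lt_length_of_mem hq
  have hmem : (q, (perms.idxOf q : Int)) ∈ ((PySem.List.enumerate perms 0).foldl
      (fun d ip => d.insert ip.2 ip.1) (PySem.Dict.empty : PySem.Dict (List Int) Int)).items := by
    rw [hitems]
    refine List.mem_map.mpr ⟨((perms.idxOf q : Int), q), ?_, rfl⟩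
    exact (PySem.List.mem_enumerate_iff perms 0 _).mpr
      ⟨perms.idxOf q, hk, by simp [List.getElem_idxOf hk]⟩
  exact PySem.Dict.getD_of_mem_items _ hmem (by rw [hkeys]; exact hnd) 0

theorem map_pyGetD_perm (n : Int) (pi : List Int) (hpi : pi.Perm (PySem.List.pyRange 0 n 1)) :
    (PySem.List.pyRange 0 n 1).map (fun v => PySem.List.pyGetD pi v 0) = pi := by
  by_cases hn : 0 ≤ n
  · have hlen : ((pi.length : Int)) = n := by
      rw [hpi.length_eq, PySem.List.length_pyRange_one]; omega
    rw [← hlen]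
    exact PySem.List.map_pyGetD_pyRange_zero' pi 0
  · have h0 : PySem.List.pyRange 0 n 1 = [] := PySem.List.pyRange_one_eq_nil (by omega)
    have hnil : pi = [] := List.perm_nil.mp (h0 ▸ hpi)
    rw [h0, hnil]; rfl

theorem composed_eq (n : Int) (pi pj : List Int) (hpj : pj.Perm (PySem.List.pyRange 0 n 1)) :
    (PySem.List.pyRange 0 n 1).map (fun k =>
        PySem.List.pyGetD pi (PySem.List.pyGetD pj k 0) 0)
      = pj.map (fun v => PySem.List.pyGetD pi v 0) := by
  by_cases hn : 0 ≤ n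
  · have hlen : ((pj.length : Int)) = n := by
      rw [hpj.length_eq, PySem.List.length_pyRange_one]; omega
    rw [← hlen]
    conv_rhs => rw [← PySem.List.map_pyGetD_pyRange_zero' pj 0]
    rw [List.map_map]
    rfl
  · have h0 : PySem.List.pyRange 0 n 1 = [] := PySem.List.pyRange_one_eq_nil (by omega)
    have : pj = [] := List.perm_nil.mp (by rw [← h0]; exact hpj)
    rw [h0, this]; rfl

theorem map_index {α β : Type} (xs : List β) (d : β) (F : β → α) :
    (PySem.List.pyRange 0 (xs.length : Int) 1).map (fun i => F (PySem.List.pyGetD xs i d))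
      = xs.map F := by
  conv_rhs => rw [← PySem.List.map_pyGetD_pyRange_zero' xs d]
  rw [List.map_map]
  rfl

theorem map_index2 {α : Type} (xs : List (List Int)) (G : List Int → List Int → α) :
    (PySem.List.pyRange 0 (xs.length : Int) 1).map (fun i =>
        (PySem.List.pyRange 0 (xs.length : Int) 1).map (fun j =>
          G (PySem.List.pyGetD xs i []) (PySem.List.pyGetD xs j [])))
      = xs.map (fun pi => xs.map (fun pj => G pi pj)) := by
  refine Eq.trans (map_index xs ([] : List Int)
    (fun pi => (PySem.List.pyRange 0 (xs.length : Int) 1).map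
      (fun j => G pi (PySem.List.pyGetD xs j [])))) ?_
  exact List.map_congr_left (fun pi _ => map_index xs ([] : List Int) (fun pj => G pi pj))

set_option maxHeartbeats 1600000 in
theorem ab_eq (n : Int) : generate_symmetric_table n = generate_symmetric_table_alt n := by
  simp only [generate_symmetric_table, generate_symmetric_table_alt, lexPerms]
  refine Prod.ext ?_ rfl
  simp only
  set l := PySem.List.pyRange 0 n 1 with hl
  have hsort : l.Pairwise (· < ·) := PySem.List.pairwise_lt_pyRange_one 0 n
  have hndl : l.Nodup := PySem.List.nodup_pyRange_one 0 n
  have hperm : ∀ p ∈ lexPermsAux l.length l, p.Perm l :=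
    fun p hp => perm_of_mem_lexPermsAux l.length l p rfl hp
  have hnd : (lexPermsAux l.length l).Nodup := nodup_lexPermsAux l.length l rfl hndl
  refine Eq.trans (map_index2 (lexPermsAux l.length l) (fun pi pj =>
    ((PySem.List.enumerate (lexPermsAux l.length l) 0).foldl
        (fun d ip => d.insert ip.2 ip.1) (PySem.Dict.empty : PySem.Dict (List Int) Int)).getD
      (l.map (fun k => PySem.List.pyGetD pi (PySem.List.pyGetD pj k 0) 0)) 0)) ?_
  refine List.map_congr_left ?_
  intro pi hpi
  refine List.map_congr_left ?_
  intro pj hpj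
  have hcperm : (l.map (fun k =>
      PySem.List.pyGetD pi (PySem.List.pyGetD pj k 0) 0)).Perm l := by
    rw [hl, composed_eq n pi pj (hl ▸ hperm pj hpj)]
    exact (((hperm pj hpj).map _).trans
      (by rw [hl, map_pyGetD_perm n pi (hl ▸ hperm pi hpi)])).trans (hperm pi hpi)
  set c := l.map (fun k => PySem.List.pyGetD pi (PySem.List.pyGetD pj k 0) 0) with hc
  have hcmem : c ∈ lexPermsAux l.length l := mem_lexPermsAux l.length l c rfl hcperm
  rw [dict_getD _ hnd c hcmem, idxOf_lexPermsAux l.length l c rfl hsort hcperm]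
  rw [rankAlt_eq_rkN n c (by rw [hcperm.length_eq, hl, PySem.List.length_pyRange_one]; simp)]

-- ===== VERDICT (by name: the statement is the Claim_ definition above) =====
theorem generate_symmetric_table_spec : Claim_equal_generate_symmetric_table := by
  intro n _
  unfold Spec_generate_symmetric_table
  exact ab_eq n
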